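-- pv_equiv track=rewrite | github.com/jpns3334444/scraper | lambda/property_processor/core_scraper.py | select_images_for_download
-- ===== SOURCE A (Python) =====
-- def select_images_for_download(classified_urls, max_total=10, max_floorplan=1, max_exterior=1, max_facility=1, max_other=1, logger=None):
--     """Select images with strict caps per category"""
--     # classified_urls: list of (url, category, alt) tuples AFTER DEDUPE; category already normalized
--
--     # Separate by category
--     floorplans = [(u, c, a) for u, c, a in classified_urls if c == 'floorplan']
--     exteriors = [(u, c, a) for u, c, a in classified_urls if c == 'exterior']
--     interiors = [(u, c, a) for u, c, a in classified_urls if c == 'interior']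
--     facilities = [(u, c, a) for u, c, a in classified_urls if c == 'facility']
--     others = [(u, c, a) for u, c, a in classified_urls if c == 'other']
--
--     selected = []
--
--     # Apply strict caps
--     selected.extend(floorplans[:max_floorplan])
--     selected.extend(exteriors[:max_exterior])
--     selected.extend(facilities[:max_facility])
--     selected.extend(others[:max_other])
--
--     # Fill remainder with interior only
--     remaining = max_total - len(selected)
--     if remaining > 0:
--         selected.extend(interiors[:remaining])
--
--     # Calculate breakdown
--     breakdown = {
--         'floorplan': sum(1 for u, c, a in selected if c == 'floorplan'),
--         'exterior': sum(1 for u, c, a in selected if c == 'exterior'),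
--         'facility': sum(1 for u, c, a in selected if c == 'facility'),
--         'other': sum(1 for u, c, a in selected if c == 'other'),
--         'interior': sum(1 for u, c, a in selected if c == 'interior'),
--     }
--
--     if logger:
--         logger.info(f"Selected {len(selected)}/{max_total} images: {breakdown}")
--
--     # Return URLs for download
--     selected_urls = [url for url, _, _ in selected]
--     return selected_urls, breakdown
-- ===== SOURCE B (Python) =====
-- def select_images_for_download(classified_urls, max_total=10, max_floorplan=1, max_exterior=1, max_facility=1, max_other=1, logger=None):
--     """Select images with strict caps per category (single grouping pass, breakdown from slice sizes)"""
--     groups = {}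
--     for u, c, a in classified_urls:
--         groups.setdefault(c, []).append(u)
--     fp = groups.get('floorplan', [])[:max_floorplan]
--     ex = groups.get('exterior', [])[:max_exterior]
--     fa = groups.get('facility', [])[:max_facility]
--     ot = groups.get('other', [])[:max_other]
--     remaining = max_total - (len(fp) + len(ex) + len(fa) + len(ot))
--     it = groups.get('interior', [])[:remaining] if remaining > 0 else []
--     breakdown = {
--         'floorplan': len(fp),
--         'exterior': len(ex),
--         'facility': len(fa),
--         'other': len(ot),
--         'interior': len(it),
--     }
--     if logger:
--         n = len(fp) + len(ex) + len(fa) + len(ot) + len(it)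
--         logger.info(f"Selected {n}/{max_total} images: {breakdown}")
--     return fp + ex + fa + ot + it, breakdown
-- ===== Notes on version B (the rewrite author's own statement) =====
-- stated objective: simpler
-- what changed: One grouping pass with a dict of URL lists replaces the five per-category filter passes, and the breakdown is computed from the sizes of the capped slices instead of re-scanning the selected list with five counting passes.
import Mathlib
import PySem

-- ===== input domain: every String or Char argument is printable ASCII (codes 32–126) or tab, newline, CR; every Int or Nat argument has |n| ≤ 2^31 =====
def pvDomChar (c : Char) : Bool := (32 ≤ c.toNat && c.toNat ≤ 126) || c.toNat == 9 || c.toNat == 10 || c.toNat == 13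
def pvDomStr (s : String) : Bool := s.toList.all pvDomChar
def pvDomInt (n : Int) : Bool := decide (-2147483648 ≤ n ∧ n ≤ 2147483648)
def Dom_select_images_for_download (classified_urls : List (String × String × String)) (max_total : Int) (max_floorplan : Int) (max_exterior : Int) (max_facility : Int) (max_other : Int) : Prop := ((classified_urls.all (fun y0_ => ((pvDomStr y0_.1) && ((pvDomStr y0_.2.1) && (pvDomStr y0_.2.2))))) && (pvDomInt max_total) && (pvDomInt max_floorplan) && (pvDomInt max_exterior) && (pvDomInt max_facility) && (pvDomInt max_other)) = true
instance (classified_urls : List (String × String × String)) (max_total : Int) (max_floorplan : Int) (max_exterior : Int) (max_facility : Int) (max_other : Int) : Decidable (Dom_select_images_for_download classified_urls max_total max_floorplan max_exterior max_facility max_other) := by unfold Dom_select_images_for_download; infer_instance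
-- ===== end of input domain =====

-- B replaces A's five per-category filter passes and five counting re-scans of `selected`
-- by one grouping pass into a dict of URL lists, with the breakdown read off the capped
-- slice sizes; same return value (the `logger` side channel of the Python is unused here).

-- ===== PORT A =====
def select_images_for_download (classified_urls : List (String × String × String)) (max_total : Int) (max_floorplan : Int) (max_exterior : Int) (max_facility : Int) (max_other : Int) : List String × (List (String × Int)) :=
  let floorplans := classified_urls.filter (fun x => x.2.1 == "floorplan")
  let exteriors  := classified_urls.filter (fun x => x.2.1 == "exterior")
  let interiors  := classified_urls.filter (fun x => x.2.1 == "interior")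
  let facilities := classified_urls.filter (fun x => x.2.1 == "facility")
  let others     := classified_urls.filter (fun x => x.2.1 == "other")
  let selected : List (String × String × String) := []
  let selected := selected ++ PySem.List.slice floorplans none (some max_floorplan)
  let selected := selected ++ PySem.List.slice exteriors  none (some max_exterior)
  let selected := selected ++ PySem.List.slice facilities none (some max_facility)
  let selected := selected ++ PySem.List.slice others     none (some max_other)
  let remaining : Int := max_total - (selected.length : Int)
  let selected := if remaining > 0 then selected ++ PySem.List.slice interiors none (some remaining) else selected
  let breakdown : List (String × Int) :=
    [("floorplan", (selected.countP (fun x => x.2.1 == "floorplan") : Int)),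
     ("exterior",  (selected.countP (fun x => x.2.1 == "exterior")  : Int)),
     ("facility",  (selected.countP (fun x => x.2.1 == "facility")  : Int)),
     ("other",     (selected.countP (fun x => x.2.1 == "other")     : Int)),
     ("interior",  (selected.countP (fun x => x.2.1 == "interior")  : Int))]
  let selected_urls := selected.map (fun x => x.1)
  (selected_urls, breakdown)

-- ===== PORT B =====
def select_images_for_download_alt (classified_urls : List (String × String × String)) (max_total : Int) (max_floorplan : Int) (max_exterior : Int) (max_facility : Int) (max_other : Int) : List String × (List (String × Int)) :=
  let groups : PySem.Dict String (List String) :=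
    classified_urls.foldl (fun d x => PySem.Dict.modify d x.2.1 [] (fun s => s ++ [x.1])) PySem.Dict.empty
  let fp := PySem.List.slice (groups.getD "floorplan" []) none (some max_floorplan)
  let ex := PySem.List.slice (groups.getD "exterior"  []) none (some max_exterior)
  let fa := PySem.List.slice (groups.getD "facility"  []) none (some max_facility)
  let ot := PySem.List.slice (groups.getD "other"     []) none (some max_other)
  let remaining : Int := max_total - ((fp.length : Int) + (ex.length : Int) + (fa.length : Int) + (ot.length : Int))
  let it := if remaining > 0 then PySem.List.slice (groups.getD "interior" []) none (some remaining) else []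
  let breakdown : List (String × Int) :=
    [("floorplan", (fp.length : Int)),
     ("exterior",  (ex.length : Int)),
     ("facility",  (fa.length : Int)),
     ("other",     (ot.length : Int)),
     ("interior",  (it.length : Int))]
  (fp ++ ex ++ fa ++ ot ++ it, breakdown)

-- ===== PRECONDITION & SPEC =====
def Spec_select_images_for_download (classified_urls : List (String × String × String)) (max_total : Int) (max_floorplan : Int) (max_exterior : Int) (max_facility : Int) (max_other : Int) (out : List String × (List (String × Int))) : Prop := out = select_images_for_download_alt classified_urls max_total max_floorplan max_exterior max_facility max_other
instance (classified_urls : List (String × String × String)) (max_total : Int) (max_floorplan : Int) (max_exterior : Int) (max_facility : Int) (max_other : Int) (out : List String × (List (String × Int))) : Decidable (Spec_select_images_for_download classified_urls max_total max_floorplan max_exterior max_facility max_other out) := by unfold Spec_select_images_for_download; infer_instance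

-- ===== CLAIM (what is proved, stated in full; the proofs are below) =====
def Claim_equal_select_images_for_download : Prop := ∀ (classified_urls : List (String × String × String)) (max_total : Int) (max_floorplan : Int) (max_exterior : Int) (max_facility : Int) (max_other : Int), Dom_select_images_for_download classified_urls max_total max_floorplan max_exterior max_facility max_other → Spec_select_images_for_download classified_urls max_total max_floorplan max_exterior max_facility max_other (select_images_for_download classified_urls max_total max_floorplan max_exterior max_facility max_other)

-- ===== LEMMAS AND PROOFS =====

-- B's grouping loop, looked up at category c, yields the URLs of A's filter pass for c.
theorem pv_groups_getD (l : List (String × String × String)) (c : String) :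
    (l.foldl (fun d x => PySem.Dict.modify d x.2.1 [] (fun s => s ++ [x.1])) PySem.Dict.empty).getD c []
      = (l.filter (fun x => x.2.1 == c)).map (fun x => x.1) := by
  have aux : ∀ (t : List (String × String × String)) (d : PySem.Dict String (List String)),
      (t.foldl (fun d x => PySem.Dict.modify d x.2.1 [] (fun s => s ++ [x.1])) d).getD c []
        = d.getD c [] ++ (t.filter (fun x => x.2.1 == c)).map (fun x => x.1) := by
    intro t
    induction t with
    | nil => intro d; simp
    | cons x t ih =>
      intro d
      simp only [List.foldl_cons, ih, PySem.Dict.getD_modify, List.filter_cons]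
      by_cases hc : c = x.2.1
      · simp [hc]
      · have : (x.2.1 == c) = false := by simp [Ne.symm hc]
        simp [hc, this]
  simpa using aux l PySem.Dict.empty

-- slicing commutes with map (a prefix slice of a mapped list is the mapped prefix slice)
theorem pv_slice_map {α β : Type} (l : List α) (f : α → β) (b : Int) :
    PySem.List.slice (l.map f) none (some b) = (PySem.List.slice l none (some b)).map f := by
  simp [PySem.List.slice, PySem.List.clampIdx]

-- counting category c inside a capped slice of the c-filtered list is its length
theorem pv_cnt_self (l : List (String × String × String)) (c : String) (b : Int) :
    (PySem.List.slice (l.filter (fun x => x.2.1 == c)) none (some b)).countP (fun x => x.2.1 == c)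
      = (PySem.List.slice (l.filter (fun x => x.2.1 == c)) none (some b)).length := by
  apply List.countP_eq_length.mpr
  intro x hx
  have hm : x ∈ l.filter (fun x => x.2.1 == c) := PySem.List.mem_of_mem_slice _ _ _ hx
  exact (List.mem_filter.mp hm).2

-- counting category c inside a capped slice of a differently-filtered list is zero
theorem pv_cnt_ne (l : List (String × String × String)) (c c' : String) (hne : c' ≠ c) (b : Int) :
    (PySem.List.slice (l.filter (fun x => x.2.1 == c')) none (some b)).countP (fun x => x.2.1 == c)
      = 0 := by
  apply List.countP_eq_zero.mpr
  intro x hx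
  have h : x.2.1 = c' := by
    have hm : x ∈ l.filter (fun x => x.2.1 == c') := PySem.List.mem_of_mem_slice _ _ _ hx
    exact eq_of_beq (List.mem_filter.mp hm).2
  simp [h, hne]

-- ===== VERDICT (by name: the statement is the Claim_ definition above) =====
theorem select_images_for_download_spec : Claim_equal_select_images_for_download := by
  intro classified_urls max_total max_floorplan max_exterior max_facility max_other _
  unfold Spec_select_images_for_download
  unfold select_images_for_download select_images_for_download_alt
  simp only [pv_groups_getD, pv_slice_map, List.nil_append]
  set sF := PySem.List.slice (classified_urls.filter (fun x => x.2.1 == "floorplan")) none (some max_floorplan) with hF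
  set sE := PySem.List.slice (classified_urls.filter (fun x => x.2.1 == "exterior")) none (some max_exterior) with hE
  set sFa := PySem.List.slice (classified_urls.filter (fun x => x.2.1 == "facility")) none (some max_facility) with hFa
  set sO := PySem.List.slice (classified_urls.filter (fun x => x.2.1 == "other")) none (some max_other) with hO
  simp only [List.length_map, List.length_append]
  have hlen : ((sF.length + sE.length + sFa.length + sO.length : Nat) : Int)
      = (sF.length : Int) + (sE.length : Int) + (sFa.length : Int) + (sO.length : Int) := by push_cast; ring
  rw [hlen]
  by_cases hrem : max_total - ((sF.length : Int) + (sE.length : Int) + (sFa.length : Int) + (sO.length : Int)) > 0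
  · simp only [if_pos hrem]
    set sI := PySem.List.slice (classified_urls.filter (fun x => x.2.1 == "interior")) none
      (some (max_total - ((sF.length : Int) + (sE.length : Int) + (sFa.length : Int) + (sO.length : Int)))) with hI
    refine Prod.ext ?_ ?_
    · simp [List.map_append]
    · simp only [List.countP_append]
      simp [hF, hE, hFa, hO, hI, pv_cnt_self, pv_cnt_ne]
  · simp only [if_neg hrem]
    refine Prod.ext ?_ ?_
    · simp [List.map_append]
    · simp only [List.countP_append]
      simp [hF, hE, hFa, hO, pv_cnt_self, pv_cnt_ne]
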